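-- pv_equiv track=rewrite | github.com/rishabh26malik/SSD-ASSG-3 | q2.py | daysBefore
-- ===== SOURCE A (Python) =====
-- days=[31, 28, 31, 30, 31, 30, 31, 31, 30, 31, 30, 31]
--
-- def isLeap(YY):
-- 	if(YY%100==0):
-- 		if(YY%400==0):
-- 			return True
-- 	elif(YY%4==0):
-- 		return True
-- 	return False
--
-- def daysBefore(DD,MM,YY):
-- 	days_count=0
-- 	total_days=365
-- 	if(isLeap(YY)==True):
-- 		days_count+=1
-- 	MM-=1
-- 	i=MM-1
-- 	while(i>=0):
-- 		days_count+=days[i]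
-- 		i-=1
-- 	days_count+=DD-1
-- 	return days_count
-- ===== SOURCE B (Python) =====
-- days=[31, 28, 31, 30, 31, 30, 31, 31, 30, 31, 30, 31]
--
-- # cumulative month-length prefix: prefix[k] = days in the first k months (prefix[0]=0 .. prefix[12]=365)
-- prefix=[0, 31, 59, 90, 120, 151, 181, 212, 243, 273, 304, 334, 365]
--
-- def isLeap(YY):
-- 	if(YY%100==0):
-- 		if(YY%400==0):
-- 			return True
-- 	elif(YY%4==0):
-- 		return True
-- 	return False
--
-- def daysBefore(DD,MM,YY):
-- 	idx=MM-1
-- 	base=prefix[idx] if idx>=0 else 0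
-- 	return base+(DD-1)+(1 if isLeap(YY) else 0)
-- ===== Notes on version B (the rewrite author's own statement) =====
-- stated objective: idiomatic
-- what changed: Replaces the descending while-loop that sums month lengths with a precomputed 13-entry cumulative prefix array looked up once; the leap-day increment and DD-1 stay as in A.
import Mathlib
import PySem

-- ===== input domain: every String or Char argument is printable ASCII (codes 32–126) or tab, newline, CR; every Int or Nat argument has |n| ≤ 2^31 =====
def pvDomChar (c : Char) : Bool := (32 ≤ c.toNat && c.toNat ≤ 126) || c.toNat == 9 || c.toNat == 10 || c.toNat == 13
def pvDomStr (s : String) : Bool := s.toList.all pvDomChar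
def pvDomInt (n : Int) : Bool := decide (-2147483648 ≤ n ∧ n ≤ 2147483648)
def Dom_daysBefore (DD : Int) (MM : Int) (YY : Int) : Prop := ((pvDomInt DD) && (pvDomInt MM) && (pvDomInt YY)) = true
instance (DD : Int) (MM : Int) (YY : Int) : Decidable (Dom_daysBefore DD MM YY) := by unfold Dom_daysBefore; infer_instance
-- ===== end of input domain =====

-- B replaces A's month-summing while-loop with a single lookup in a precomputed cumulative prefix array (idiomatic O(1) table lookup).

-- ===== PORT A =====
def daysA : List Int := [31, 28, 31, 30, 31, 30, 31, 31, 30, 31, 30, 31]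

def isLeapA (YY : Int) : Bool :=
  if PySem.Int.mod YY 100 == 0 then
    if PySem.Int.mod YY 400 == 0 then true else false
  else if PySem.Int.mod YY 4 == 0 then true
  else false

-- the while(i>=0) loop of A, recursing on the (nonnegative) counter i down to 0;
-- days[i] is always in range on Pre_ (MM ≤ 13), so getD 0 is exact there
def sumDownAux : Nat → Int
  | 0 => (PySem.List.pyGet? daysA 0).getD 0
  | n + 1 => (PySem.List.pyGet? daysA ((n : Int) + 1)).getD 0 + sumDownAux n

def sumDownA (i : Int) : Int := if 0 ≤ i then sumDownAux i.toNat else 0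

def daysBefore (DD : Int) (MM : Int) (YY : Int) : Int :=
  let days_count : Int := 0
  let days_count := if isLeapA YY = true then days_count + 1 else days_count
  let MM' := MM - 1
  let days_count := days_count + sumDownA (MM' - 1)
  days_count + (DD - 1)

-- ===== PORT B =====
def prefixB : List Int := [0, 31, 59, 90, 120, 151, 181, 212, 243, 273, 304, 334, 365]

def isLeapB (YY : Int) : Bool :=
  if PySem.Int.mod YY 100 == 0 then
    if PySem.Int.mod YY 400 == 0 then true else false
  else if PySem.Int.mod YY 4 == 0 then true
  else false

def daysBefore_alt (DD : Int) (MM : Int) (YY : Int) : Int :=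
  let idx := MM - 1
  let base := if idx ≥ 0 then (PySem.List.pyGet? prefixB idx).getD 0 else 0
  base + (DD - 1) + (if isLeapB YY = true then 1 else 0)

-- ===== PRECONDITION & SPEC =====
-- Pre_ excludes exactly MM ≥ 14, where both Pythons raise IndexError on the 12/13-entry table.
def Pre_daysBefore (DD : Int) (MM : Int) (YY : Int) : Prop := MM ≤ 13
instance (DD : Int) (MM : Int) (YY : Int) : Decidable (Pre_daysBefore DD MM YY) := by unfold Pre_daysBefore; infer_instance
def pvWitness_daysBefore : Int × Int × Int := (5, 3, 2000)

def Spec_daysBefore (DD : Int) (MM : Int) (YY : Int) (out : Int) : Prop := out = daysBefore_alt DD MM YY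
instance (DD : Int) (MM : Int) (YY : Int) (out : Int) : Decidable (Spec_daysBefore DD MM YY out) := by unfold Spec_daysBefore; infer_instance

-- ===== CLAIM =====
def Claim_equal_daysBefore : Prop := ∀ (DD : Int) (MM : Int) (YY : Int), Dom_daysBefore DD MM YY → Pre_daysBefore DD MM YY → Spec_daysBefore DD MM YY (daysBefore DD MM YY)

-- ===== LEMMAS AND PROOFS =====
theorem sumDownA_neg (i : Int) (h : i < 0) : sumDownA i = 0 := by
  unfold sumDownA; rw [if_neg (by omega)]

theorem sumEq (MM : Int) (h : MM ≤ 13) :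
    sumDownA (MM - 1 - 1) = (if MM - 1 ≥ 0 then (PySem.List.pyGet? prefixB (MM - 1)).getD 0 else 0) := by
  by_cases h0 : MM ≤ 0
  · rw [sumDownA_neg _ (by omega), if_neg (by omega : ¬ (MM - 1 ≥ 0))]
  · interval_cases MM <;> decide

theorem daysBefore_spec : Claim_equal_daysBefore := by
  intro DD MM YY _ hpre
  show ((if isLeapA YY = true then (0:Int) + 1 else 0) + sumDownA (MM - 1 - 1) + (DD - 1)) =
    ((if MM - 1 ≥ 0 then (PySem.List.pyGet? prefixB (MM - 1)).getD 0 else 0) + (DD - 1) +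
      (if isLeapB YY = true then 1 else 0))
  rw [sumEq MM hpre]
  have hL : isLeapA = isLeapB := rfl
  rw [hL]
  split_ifs <;> ring
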